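/- GENERATED by farm/mkstatement.py from design/units.tsv (unit `DGifGetImageDesc.COMPOSITION`) and the Specs of Gif/Spec/*.lean — do not edit.
   THE STATEMENT of the proof unit `DGifGetImageDesc.COMPOSITION`: the function `DGifGetImageDesc` (115 instructions) satisfies its contract,
   GIVEN THE STATEMENTS OF ITS 7 SEGMENTS (`Gif.Spec.DGifGetImageDesc.Seg<k> Lay μ u₀`: what the unit `DGifGetImageDesc.<k>` proves).
   No machine code is walked: `ReachVia.trans` along the segments (the exit assertion of a segment is the entry assertion of
   its successor), an induction on the loop measures. What the names mean: ProgX/Base/Spec/Basic.lean. The theorem to prove: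
   `theorem DGifGetImageDesc_COMPOSITION_ok : Gif.Spec.DGifGetImageDesc_COMPOSITION.Statement`. -/
import Gif.Code
import Gif.Dec.All
import Gif.Labels
import Gif.Spec.Desc
import Gif.Spec.Seg_DGifGetImageDesc
namespace Gif.Spec.DGifGetImageDesc_COMPOSITION
open X86 X86.User Asan

/-- The statement of unit `DGifGetImageDesc.COMPOSITION`. -/
def Statement : Prop :=
  ∀ (Lay : Layout) (_hLay : Lay.hi = 0x1000000) (μ : Microarch) (_hμ : UserX.MicroOK μ) (u₀ : State)
    (_h_DGifGetImageDesc_1 : Gif.Spec.DGifGetImageDesc.Seg1 Lay μ u₀)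
    (_h_DGifGetImageDesc_2 : Gif.Spec.DGifGetImageDesc.Seg2 Lay μ u₀)
    (_h_DGifGetImageDesc_3 : Gif.Spec.DGifGetImageDesc.Seg3 Lay μ u₀)
    (_h_DGifGetImageDesc_4 : Gif.Spec.DGifGetImageDesc.Seg4 Lay μ u₀)
    (_h_DGifGetImageDesc_5 : Gif.Spec.DGifGetImageDesc.Seg5 Lay μ u₀)
    (_h_DGifGetImageDesc_6 : Gif.Spec.DGifGetImageDesc.Seg6 Lay μ u₀)
    (_h_DGifGetImageDesc_E : Gif.Spec.DGifGetImageDesc.SegE Lay μ u₀),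
    ∀ (H : Heap) (rest : List Obj) (frames : List (Nat × FrameLayout)) (F : Forest) (R : Rd), Calls Lay μ ProgX.Base.WayInv (ProgX.Base.conv u₀) Gif.L.DGifGetImageDesc.entry (Gif.Spec.DGifGetImageDesc.spec H rest frames F R)

end Gif.Spec.DGifGetImageDesc_COMPOSITION
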